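-- pv_equiv track=rewrite | github.com/EnableSecurity/wafw00f | wafw00f/lib/evillib.py | scrambledheader
-- ===== SOURCE A (Python) =====
-- def scrambledheader(header):
--     c = 'connection'
--     if len(header) != len(c):
--         return False
--     if header == c:
--         return False
--     for character in c:
--         if c.count(character) != header.count(character):
--             return False
--     return True
-- ===== SOURCE B (Python) =====
-- def scrambledheader(header):
--     c = 'connection'
--     return sorted(header) == sorted(c) and header != c
-- ===== Notes on version B (the rewrite author's own statement) =====
-- stated objective: simpler
-- what changed: Replaces the length check plus per-character count loop with a single sort-and-compare anagram test (sorted(header) == sorted(c)) guarded by header != c.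
import Mathlib
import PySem

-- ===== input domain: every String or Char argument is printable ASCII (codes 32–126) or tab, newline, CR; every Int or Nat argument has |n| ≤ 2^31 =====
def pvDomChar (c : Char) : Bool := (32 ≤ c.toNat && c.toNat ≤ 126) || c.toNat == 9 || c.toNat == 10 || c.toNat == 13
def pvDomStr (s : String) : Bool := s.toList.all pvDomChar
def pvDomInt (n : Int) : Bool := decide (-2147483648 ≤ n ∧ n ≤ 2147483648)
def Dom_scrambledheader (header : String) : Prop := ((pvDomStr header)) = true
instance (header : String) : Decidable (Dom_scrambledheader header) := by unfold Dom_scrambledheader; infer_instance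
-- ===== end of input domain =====

-- B replaces A's length check + per-character count loop by a single sort-and-compare
-- anagram test guarded by `header != c` (simpler, one comparison pass after sorting).

-- ===== PORT A =====
-- the `for character in c: if c.count(…) != header.count(…): return False` loop,
-- as structural recursion over the remaining characters of c
def scrLoopA (c header : String) : List Char → Bool
  | [] => true
  | ch :: rest =>
    if PySem.Str.count c (String.ofList [ch]) ≠ PySem.Str.count header (String.ofList [ch]) then false
    else scrLoopA c header rest

def scrambledheader (header : String) : Bool :=
  let c := "connection"
  if PySem.Str.len header ≠ PySem.Str.len c then false
  else if header == c then false
  else scrLoopA c header c.toList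

-- ===== PORT B =====
def scrambledheader_alt (header : String) : Bool :=
  let c := "connection"
  (PySem.List.sorted header.toList (fun x => x) false ==
    PySem.List.sorted c.toList (fun x => x) false) && header != c

-- ===== PRECONDITION & SPEC =====
def Spec_scrambledheader (header : String) (out : Bool) : Prop := out = scrambledheader_alt header
instance (header : String) (out : Bool) : Decidable (Spec_scrambledheader header out) := by unfold Spec_scrambledheader; infer_instance

-- ===== CLAIM (what is proved, stated in full; the proofs are below) =====
def Claim_equal_scrambledheader : Prop := ∀ (header : String), Dom_scrambledheader header → Spec_scrambledheader header (scrambledheader header)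

-- ===== LEMMAS AND PROOFS =====

-- counting a single-character substring is char counting
theorem chars_count_go_singleton (ch : Char) :
    ∀ (l : List Char) (fuel acc : Nat), l.length ≤ fuel →
      PySem.Chars.count.go [ch] fuel l acc = acc + l.count ch := by
  intro l
  induction l with
  | nil => intro fuel acc _; cases fuel <;> simp [PySem.Chars.count.go]
  | cons h t ih =>
    intro fuel acc hle
    cases fuel with
    | zero => simp at hle
    | succ n =>
      simp only [PySem.Chars.count.go]
      by_cases hc : h = ch
      · subst hc
        simp only [List.isPrefixOf, beq_self_eq_true, Bool.true_and,
          if_pos, List.length_singleton, List.drop_succ_cons, List.drop_zero]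
        rw [ih n (acc + 1) (by simpa using hle)]
        simp
        omega
      · have : List.isPrefixOf [ch] (h :: t) = false := by
          simp [List.isPrefixOf]
          exact fun h' => absurd h'.symm hc
        rw [this]
        simp only [Bool.false_eq_true, if_false]
        rw [ih n acc (by simpa using hle)]
        simp [hc]

theorem chars_count_singleton (s : List Char) (ch : Char) :
    PySem.Chars.count s [ch] = s.count ch := by
  simp only [PySem.Chars.count, List.isEmpty, Bool.false_eq_true, if_false]
  exact (chars_count_go_singleton ch s s.length 0 le_rfl).trans (Nat.zero_add _)

theorem str_count_singleton (s : String) (ch : Char) :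
    PySem.Str.count s (String.ofList [ch]) = s.toList.count ch := by
  simp only [PySem.Str.count, String.toList_ofList, chars_count_singleton]

-- the loop returns true iff every character of the remaining list has matching counts
theorem scrLoopA_true_iff (c header : String) (l : List Char) :
    scrLoopA c header l = true ↔
      ∀ ch ∈ l, c.toList.count ch = header.toList.count ch := by
  induction l with
  | nil => simp [scrLoopA]
  | cons h t ih =>
    simp only [scrLoopA, str_count_singleton]
    by_cases hc : c.toList.count h ≠ header.toList.count h
    · simp only [if_pos hc]
      constructor
      · intro h'; cases h'
      · intro hall
        exact absurd (hall h (by simp)) hc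
    · simp only [if_neg hc, ih]
      have hc := not_not.mp hc
      constructor
      · intro hall ch hch
        rcases List.mem_cons.mp hch with rfl | hmem
        · exact hc
        · exact hall ch hmem
      · intro hall ch hch
        exact hall ch (List.mem_cons_of_mem _ hch)

-- counts matching on every character of C, plus equal lengths, gives a permutation
theorem perm_of_counts (L C : List Char)
    (hlen : L.length = C.length)
    (hcnt : ∀ ch ∈ C, C.count ch = L.count ch) : L.Perm C := by
  have hsub : C.Subperm L := by
    rw [List.subperm_ext_iff]
    intro a ha
    exact (hcnt a ha).le
  exact (hsub.perm_of_length_le hlen.le).symm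

theorem scrambledheader_equal (header : String) :
    scrambledheader header = scrambledheader_alt header := by
  unfold scrambledheader scrambledheader_alt
  simp only []
  set c : String := "connection" with hc
  by_cases hlen : PySem.Str.len header ≠ PySem.Str.len c
  · rw [if_pos hlen]
    have hne : PySem.List.sorted header.toList (fun x => x) false ≠
        PySem.List.sorted c.toList (fun x => x) false := by
      intro hEq
      apply hlen
      have := congrArg List.length hEq
      simpa [PySem.List.length_sorted, PySem.Str.len] using this
    simp [hne]
  · rw [if_neg hlen]
    have hlen := not_not.mp hlen
    by_cases heq : header = c
    · subst heq; simp
    · rw [if_neg (by simpa using heq)]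
      have hB : (header != c) = true := by simpa using heq
      rw [hB, Bool.and_true]
      rcases Bool.eq_false_or_eq_true (scrLoopA c header c.toList) with ht | hf
      · rw [ht]
        have hcnt := (scrLoopA_true_iff c header c.toList).mp ht
        have hperm := perm_of_counts header.toList c.toList
          (by simpa [PySem.Str.len] using hlen) hcnt
        symm
        rw [beq_iff_eq]
        exact (PySem.List.sorted_id_eq_sorted_id_iff_perm _ _).mpr hperm
      · rw [hf]
        symm
        rw [beq_eq_false_iff_ne]
        intro hEq
        have hperm : header.toList.Perm c.toList :=
          (PySem.List.sorted_id_eq_sorted_id_iff_perm _ _).mp hEq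
        have hT : scrLoopA c header c.toList = true := by
          rw [scrLoopA_true_iff]
          intro ch _
          exact (hperm.count_eq ch).symm
        rw [hT] at hf
        exact absurd hf (by simp)

-- ===== VERDICT (by name: the statement is the Claim_ definition above) =====
theorem scrambledheader_spec : Claim_equal_scrambledheader := by
  intro header _
  unfold Spec_scrambledheader
  exact scrambledheader_equal header
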